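-- pv_equiv track=rewrite | github.com/WhyNot0YJ/DSET | experiments/yolo/batch_inference.py | resolve_dataset_key
-- ===== SOURCE A (Python) =====
-- from typing import Dict, Any, List, Tuple
--
-- def _normalize_key(value: str) -> str:
--     return "".join(ch for ch in value.lower().strip() if ch.isalnum())
--
-- def resolve_dataset_key(datasets: Dict[str, Any], dataset_name: str) -> str:
--     target = _normalize_key(dataset_name)
--     for key, profile in datasets.items():
--         aliases = profile.get("aliases", [])
--         candidates = [_normalize_key(str(key))] + [_normalize_key(str(alias)) for alias in aliases]
--         if target in candidates:
--             return str(key)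
--     choices = ", ".join(sorted(datasets.keys()))
--     raise ValueError(f"未知数据集: {dataset_name}，可选: {choices}")
-- ===== SOURCE B (Python) =====
-- def _normalize_key(value: str) -> str:
--     return "".join(ch for ch in value.lower().strip() if ch.isalnum())
--
-- def resolve_dataset_key(datasets, dataset_name: str) -> str:
--     # Build a first-wins index from every normalized key/alias to its dataset key.
--     index = {}
--     for key, profile in datasets.items():
--         for name in [str(key)] + [str(alias) for alias in profile.get("aliases", [])]:
--             norm = _normalize_key(name)
--             if norm not in index:
--                 index[norm] = str(key)
--     target = _normalize_key(dataset_name)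
--     if target in index:
--         return index[target]
--     choices = ", ".join(sorted(datasets.keys()))
--     raise ValueError(f"未知数据集: {dataset_name}，可选: {choices}")
-- ===== Notes on version B (the rewrite author's own statement) =====
-- stated objective: alternative
-- what changed: A rebuilds and scans each dataset's candidate list per entry and returns on the first containing match; B builds one first-wins dict index from every normalized key/alias to its dataset key and then does a single lookup of the normalized name.
import Mathlib
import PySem

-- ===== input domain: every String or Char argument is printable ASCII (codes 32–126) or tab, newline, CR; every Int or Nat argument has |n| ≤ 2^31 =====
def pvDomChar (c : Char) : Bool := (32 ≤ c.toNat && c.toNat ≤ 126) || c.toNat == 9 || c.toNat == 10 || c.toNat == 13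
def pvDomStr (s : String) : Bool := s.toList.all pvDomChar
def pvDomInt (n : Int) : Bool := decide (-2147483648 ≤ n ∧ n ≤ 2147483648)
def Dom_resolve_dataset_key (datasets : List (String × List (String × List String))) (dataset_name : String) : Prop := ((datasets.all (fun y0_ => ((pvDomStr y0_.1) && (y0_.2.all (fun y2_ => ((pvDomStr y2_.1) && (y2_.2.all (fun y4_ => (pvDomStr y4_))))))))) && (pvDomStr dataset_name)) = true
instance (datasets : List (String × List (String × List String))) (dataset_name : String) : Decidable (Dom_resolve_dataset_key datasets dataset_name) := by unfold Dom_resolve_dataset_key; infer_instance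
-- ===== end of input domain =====

-- B replaces A's per-entry candidate-list scan by one first-wins dict index built over all
-- keys/aliases, followed by a single lookup (objective: alternative; same asymptotic cost).


-- shared module helper _normalize_key (both Source A and Source B define it identically)
def pyNormalizeKey (value : String) : String :=
  String.ofList ((PySem.Chars.strip (PySem.Chars.lower value.toList)).filter PySem.Chars.isalnum)

-- the error message A/B build on a miss (Python raises ValueError there; excluded by Pre_)
def pyMissMsg (datasets : List (String × List (String × List String))) (dataset_name : String) : String :=
  "未知数据集: " ++ dataset_name ++ "，可选: " ++
    PySem.Str.join ", " (PySem.List.sorted (datasets.map (·.1)) (fun k => k) false)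

-- ===== PORT A =====
-- the for-loop over datasets.items(): first entry whose candidate list contains target wins
def resolveGoA (target : String) (dataset_name : String)
    (all : List (String × List (String × List String))) :
    List (String × List (String × List String)) → String
  | [] => pyMissMsg all dataset_name     -- Python: raise ValueError (outside Pre_)
  | (key, profile) :: rest =>
      let aliases := (PySem.Dict.mk profile).getD "aliases" []
      let candidates := pyNormalizeKey key :: aliases.map pyNormalizeKey
      if target ∈ candidates then key
      else resolveGoA target dataset_name all rest

def resolve_dataset_key (datasets : List (String × List (String × List String))) (dataset_name : String) : String :=
  let target := pyNormalizeKey dataset_name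
  resolveGoA target dataset_name datasets datasets

-- ===== PORT B =====
-- first-wins index: every normalized key/alias ↦ its dataset key, first dataset wins
def insertNames (key : String) (names : List String) (d : PySem.Dict String String) :
    PySem.Dict String String :=
  names.foldl (fun d n =>
    let norm := pyNormalizeKey n
    if d.contains norm then d else d.insert norm key) d

def buildIndex (datasets : List (String × List (String × List String))) :
    PySem.Dict String String :=
  datasets.foldl (fun d p =>
    insertNames p.1 (p.1 :: (PySem.Dict.mk p.2).getD "aliases" []) d) PySem.Dict.empty

def resolve_dataset_key_alt (datasets : List (String × List (String × List String))) (dataset_name : String) : String :=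
  let index := buildIndex datasets
  let target := pyNormalizeKey dataset_name
  match index.get? target with
  | some k => k
  | none => pyMissMsg datasets dataset_name     -- Python: raise ValueError (outside Pre_)

-- ===== PRECONDITION & SPEC =====
-- Pre_ excludes exactly the inputs on which Python A (and B) raise ValueError: no dataset
-- key or alias normalizes to the normalized dataset_name.
def Pre_resolve_dataset_key (datasets : List (String × List (String × List String))) (dataset_name : String) : Prop :=
  ∃ p ∈ datasets, pyNormalizeKey dataset_name = pyNormalizeKey p.1 ∨
    ∃ a ∈ (PySem.Dict.mk p.2).getD "aliases" [], pyNormalizeKey dataset_name = pyNormalizeKey a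
instance (datasets : List (String × List (String × List String))) (dataset_name : String) : Decidable (Pre_resolve_dataset_key datasets dataset_name) := by unfold Pre_resolve_dataset_key; infer_instance

def pvWitness_resolve_dataset_key : (List (String × List (String × List String))) × String :=
  ([("coco", [("aliases", ["ms-coco"])]), ("voc", [])], "MS COCO")

def Spec_resolve_dataset_key (datasets : List (String × List (String × List String))) (dataset_name : String) (out : String) : Prop := out = resolve_dataset_key_alt datasets dataset_name
instance (datasets : List (String × List (String × List String))) (dataset_name : String) (out : String) : Decidable (Spec_resolve_dataset_key datasets dataset_name out) := by unfold Spec_resolve_dataset_key; infer_instance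

-- ===== CLAIM (what is proved, stated in full; the proofs are below) =====
def Claim_equal_resolve_dataset_key : Prop := ∀ (datasets : List (String × List (String × List String))) (dataset_name : String), Dom_resolve_dataset_key datasets dataset_name → Pre_resolve_dataset_key datasets dataset_name → Spec_resolve_dataset_key datasets dataset_name (resolve_dataset_key datasets dataset_name)

-- ===== LEMMAS AND PROOFS =====

-- looking up t after inserting all of `names` (first wins) = old lookup, else `key` if t is a normalized name
theorem get?_insertNames (key t : String) :
    ∀ (names : List String) (d : PySem.Dict String String),
      (insertNames key names d).get? t =
        (d.get? t).or (if t ∈ names.map pyNormalizeKey then some key else none) := by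
  intro names
  induction names with
  | nil =>
    intro d
    simp [insertNames]
  | cons n ns ih =>
    intro d
    have hstep : insertNames key (n :: ns) d =
        insertNames key ns (if d.contains (pyNormalizeKey n) then d
                            else d.insert (pyNormalizeKey n) key) := rfl
    rw [hstep, ih]
    by_cases ht : t = pyNormalizeKey n
    · have hmem : t ∈ (n :: ns).map pyNormalizeKey := by
        rw [List.map_cons, ht]; exact List.mem_cons_self
      rw [if_pos hmem]
      by_cases hc : d.contains (pyNormalizeKey n) = true
      · rw [if_pos hc]
        rw [← ht, PySem.Dict.contains_eq_isSome_get?] at hc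
        cases hg : d.get? t with
        | none => rw [hg] at hc; simp at hc
        | some v => rfl
      · rw [if_neg hc]
        have hcf : d.contains (pyNormalizeKey n) = false := by
          simpa using hc
        have hg : d.get? t = none := by
          rw [← ht, PySem.Dict.contains_eq_isSome_get?] at hcf
          cases hg : d.get? t with
          | none => rfl
          | some v => rw [hg] at hcf; simp at hcf
        have hins : (d.insert (pyNormalizeKey n) key).get? t = some key := by
          rw [ht]; exact PySem.Dict.get?_insert_self _ _ _
        rw [hins, hg]
        rfl
    · have h2 : (if t ∈ (n :: ns).map pyNormalizeKey then some key else none)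
          = (if t ∈ ns.map pyNormalizeKey then some key else none) := by
        by_cases h : t ∈ ns.map pyNormalizeKey
        · rw [if_pos h, if_pos (by rw [List.map_cons]; exact List.mem_cons_of_mem _ h)]
        · rw [if_neg h, if_neg (by rw [List.map_cons]; simp [ht, h])]
      rw [h2]
      have hsame : (if d.contains (pyNormalizeKey n) then d
            else d.insert (pyNormalizeKey n) key).get? t = d.get? t := by
        split
        · rfl
        · exact PySem.Dict.get?_insert_of_ne _ _ ht
      rw [hsame]

-- A's scan as an Option: the key of the first matching entry
def scanA (t : String) : List (String × List (String × List String)) → Option String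
  | [] => none
  | (key, profile) :: rest =>
      if t ∈ pyNormalizeKey key :: ((PySem.Dict.mk profile).getD "aliases" []).map pyNormalizeKey
      then some key else scanA t rest

theorem get?_buildIndex_foldl (t : String) :
    ∀ (ds : List (String × List (String × List String))) (d : PySem.Dict String String),
      (ds.foldl (fun d p => insertNames p.1 (p.1 :: (PySem.Dict.mk p.2).getD "aliases" []) d) d).get? t
        = (d.get? t).or (scanA t ds) := by
  intro ds
  induction ds with
  | nil =>
    intro d
    rw [List.foldl_nil, scanA]
    cases d.get? t <;> rfl
  | cons p rest ih =>
    intro d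
    obtain ⟨key, profile⟩ := p
    rw [List.foldl_cons, ih, get?_insertNames, Option.or_assoc, scanA]
    rw [List.map_cons]
    by_cases h : t ∈ pyNormalizeKey key :: ((PySem.Dict.mk profile).getD "aliases" []).map pyNormalizeKey
    · rw [if_pos h, if_pos h]
      rfl
    · rw [if_neg h, if_neg h]
      cases scanA t rest <;> rfl

theorem get?_buildIndex (t : String) (ds : List (String × List (String × List String))) :
    (buildIndex ds).get? t = scanA t ds := by
  unfold buildIndex
  rw [get?_buildIndex_foldl]
  rfl

theorem resolveGoA_eq_scanA (t dn : String) (all : List (String × List (String × List String))) :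
    ∀ ds, resolveGoA t dn all ds =
      (match scanA t ds with | some k => k | none => pyMissMsg all dn) := by
  intro ds
  induction ds with
  | nil => rfl
  | cons p rest ih =>
    obtain ⟨key, profile⟩ := p
    rw [resolveGoA, scanA]
    by_cases h : t ∈ pyNormalizeKey key :: ((PySem.Dict.mk profile).getD "aliases" []).map pyNormalizeKey
    · rw [if_pos h, if_pos h]
    · rw [if_neg h, if_neg h]
      exact ih

-- ===== VERDICT (by name: the statement is the Claim_ definition above) =====
theorem resolve_dataset_key_spec : Claim_equal_resolve_dataset_key := by
  intro datasets dataset_name _hDom _hPre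
  show resolve_dataset_key datasets dataset_name = resolve_dataset_key_alt datasets dataset_name
  simp only [resolve_dataset_key, resolve_dataset_key_alt]
  rw [resolveGoA_eq_scanA, get?_buildIndex]
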